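-- pv_equiv track=rewrite | github.com/tzaklama1/ct_NNVMC | phys_system/lattice.py | enumerate_fock
-- ===== SOURCE A (Python) =====
-- import itertools
-- from typing import List, Tuple, Dict
--
-- def enumerate_fock(Nsites: int, Nparticles: int) -> List[int]:
--     """Return state list encoded as bit-masks of length Nsites."""
--     basis = []
--     for occ in itertools.combinations(range(Nsites), Nparticles):
--         mask = 0
--         for i in occ:
--             mask |= 1 << i
--         basis.append(mask)
--     return basis
-- ===== SOURCE B (Python) =====
-- def enumerate_fock(Nsites, Nparticles):
--     """Pascal-triangle DP: rows[j] holds the j-particle masks over the sites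
--     processed so far, in the same lexicographic order; adding one more site
--     prepends a low bit (doubling masks, +1 when the new lowest site is occupied)."""
--     n = max(Nsites, 0)
--     if Nparticles < 0 or Nparticles > n:
--         return []
--     rows = [[0]] + [[] for _ in range(Nparticles)]
--     for _ in range(n):
--         new = [[0]]
--         for j in range(1, Nparticles + 1):
--             new.append([2 * m + 1 for m in rows[j - 1]] + [2 * m for m in rows[j]])
--         rows = new
--     return rows[Nparticles]
-- ===== Notes on version B (the rewrite author's own statement) =====
-- stated objective: alternative
-- what changed: Replaces enumeration of occupation tuples via itertools.combinations plus an inner bit-OR loop by a Pascal-triangle dynamic program over sites that builds the mask lists directly (2m+1 / 2m doubling), with no tuples and no inner OR loop.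
import Mathlib
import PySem

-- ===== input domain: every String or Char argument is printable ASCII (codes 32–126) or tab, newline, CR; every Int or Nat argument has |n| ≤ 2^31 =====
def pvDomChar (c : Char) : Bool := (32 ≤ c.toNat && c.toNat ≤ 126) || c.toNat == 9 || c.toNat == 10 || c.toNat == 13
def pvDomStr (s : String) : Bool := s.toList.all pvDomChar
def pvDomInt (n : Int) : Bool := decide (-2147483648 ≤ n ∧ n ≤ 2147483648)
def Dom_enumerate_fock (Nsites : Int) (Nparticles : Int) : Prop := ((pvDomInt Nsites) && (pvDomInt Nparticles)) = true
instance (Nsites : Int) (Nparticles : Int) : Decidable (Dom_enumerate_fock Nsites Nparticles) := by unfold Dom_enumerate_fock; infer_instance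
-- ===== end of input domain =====

-- B replaces itertools.combinations + an inner bit-OR loop by a Pascal-triangle DP over sites
-- that builds the mask lists directly (alternative decomposition; same exact output order).

-- ===== PORT A =====
-- itertools.combinations(range(n), k): lexicographic k-subsets; ported as the standard
-- recursive lex enumeration (take the head as the smallest chosen element, or skip it).
def pyCombos : List Nat → Nat → List (List Nat)
  | _, 0 => [[]]
  | [], _+1 => []
  | x :: xs, k+1 => ((pyCombos xs k).map (fun occ => x :: occ)) ++ pyCombos xs (k+1)

-- the inner loop `for i in occ: mask |= 1 << i` (mask is a nonnegative Python int: Nat, exact)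
def maskOf (occ : List Nat) : Nat := occ.foldl (fun m i => m ||| (1 <<< i)) 0

def enumerate_fock (Nsites : Int) (Nparticles : Int) : List Int :=
  (pyCombos (List.range Nsites.toNat) Nparticles.toNat).map (fun occ => Int.ofNat (maskOf occ))

-- ===== PORT B =====
-- one DP step (one more site): new[0] = [0]; new[j] = [2m+1 for rows[j-1]] + [2m for rows[j]]
def focksStep (rows : List (List Nat)) : List (List Nat) :=
  [0] :: List.zipWith (fun a b => a.map (fun m => 2*m+1) ++ b.map (fun m => 2*m)) rows rows.tail

def enumerate_fock_alt (Nsites : Int) (Nparticles : Int) : List Int :=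
  let n := max Nsites 0
  if Nparticles < 0 ∨ Nparticles > n then []
  else
    (((List.range n.toNat).foldl (fun rows _ => focksStep rows)
        ([0] :: List.replicate Nparticles.toNat [])).getD Nparticles.toNat []).map
      (fun m => Int.ofNat m)

-- ===== PRECONDITION & SPEC =====
-- A raises ValueError (itertools.combinations rejects negative r) when Nparticles < 0.
def Pre_enumerate_fock (Nsites : Int) (Nparticles : Int) : Prop := 0 ≤ Nparticles
instance (Nsites : Int) (Nparticles : Int) : Decidable (Pre_enumerate_fock Nsites Nparticles) := by unfold Pre_enumerate_fock; infer_instance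
def pvWitness_enumerate_fock : Int × Int := (4, 2)

def Spec_enumerate_fock (Nsites : Int) (Nparticles : Int) (out : List Int) : Prop := out = enumerate_fock_alt Nsites Nparticles
instance (Nsites : Int) (Nparticles : Int) (out : List Int) : Decidable (Spec_enumerate_fock Nsites Nparticles out) := by unfold Spec_enumerate_fock; infer_instance

-- ===== CLAIM (what is proved, stated in full; the proofs are below) =====
def Claim_equal_enumerate_fock : Prop := ∀ (Nsites : Int) (Nparticles : Int), Dom_enumerate_fock Nsites Nparticles → Pre_enumerate_fock Nsites Nparticles → Spec_enumerate_fock Nsites Nparticles (enumerate_fock Nsites Nparticles)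

-- ===== LEMMAS AND PROOFS =====

-- mathematical skeleton of B's DP: Lrec n k = k-particle masks over n sites, lex order
def Lrec : Nat → Nat → List Nat
  | _, 0 => [0]
  | 0, _+1 => []
  | n+1, k+1 => (Lrec n k).map (fun m => 2*m+1) ++ (Lrec n (k+1)).map (fun m => 2*m)

theorem lor_even_even (x y : Nat) : (2*x) ||| (2*y) = 2*(x|||y) := by
  have := Nat.bitwise_bit (f := or) (a := false) (m := x) (b := false) (n := y) (by simp)
  simpa [Nat.bit, Nat.lor] using this

theorem lor_odd_even (x y : Nat) : (2*x+1) ||| (2*y) = 2*(x|||y)+1 := by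
  have := Nat.bitwise_bit (f := or) (a := true) (m := x) (b := false) (n := y) (by simp)
  simpa [Nat.bit, Nat.lor] using this

theorem foldl_mask_even (occ : List Nat) : ∀ a : Nat,
    (occ.map (fun i => i+1)).foldl (fun m i => m ||| (1 <<< i)) (2*a)
      = 2 * occ.foldl (fun m i => m ||| (1 <<< i)) a := by
  induction occ with
  | nil => intro a; simp
  | cons x xs ih =>
    intro a
    have hs : (1:Nat) <<< (x+1) = 2 * (1 <<< x) := by simp [Nat.shiftLeft_succ]
    simp only [List.map_cons, List.foldl_cons, hs, lor_even_even]
    exact ih _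

theorem foldl_mask_odd (occ : List Nat) : ∀ a : Nat,
    (occ.map (fun i => i+1)).foldl (fun m i => m ||| (1 <<< i)) (2*a+1)
      = 2 * occ.foldl (fun m i => m ||| (1 <<< i)) a + 1 := by
  induction occ with
  | nil => intro a; simp
  | cons x xs ih =>
    intro a
    have hs : (1:Nat) <<< (x+1) = 2 * (1 <<< x) := by simp [Nat.shiftLeft_succ]
    simp only [List.map_cons, List.foldl_cons, hs, lor_odd_even]
    exact ih _

theorem maskOf_shift (occ : List Nat) : maskOf (occ.map (fun i => i+1)) = 2 * maskOf occ := by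
  have := foldl_mask_even occ 0
  simpa [maskOf] using this

theorem maskOf_cons_zero (occ : List Nat) :
    maskOf (0 :: occ.map (fun i => i+1)) = 2 * maskOf occ + 1 := by
  have := foldl_mask_odd occ 0
  simpa [maskOf] using this

theorem pyCombos_map (f : Nat → Nat) : ∀ (xs : List Nat) (k : Nat),
    pyCombos (xs.map f) k = (pyCombos xs k).map (List.map f) := by
  intro xs
  induction xs with
  | nil => intro k; cases k <;> simp [pyCombos]
  | cons x xs ih =>
    intro k
    cases k with
    | zero => simp [pyCombos]
    | succ k =>
      simp only [List.map_cons, pyCombos, List.map_append, List.map_map, ih]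
      rfl

theorem mask_pyCombos : ∀ (n k : Nat),
    (pyCombos (List.range n) k).map maskOf = Lrec n k := by
  intro n
  induction n with
  | zero =>
    intro k
    cases k <;> simp [pyCombos, Lrec, maskOf]
  | succ n ih =>
    intro k
    cases k with
    | zero => simp [pyCombos, Lrec, maskOf]
    | succ k =>
      have hr : List.range (n+1) = 0 :: (List.range n).map (fun i => i+1) := by
        simpa [Nat.succ_eq_add_one] using List.range_succ_eq_map (n := n)
      rw [hr]
      simp only [pyCombos, pyCombos_map, List.map_append, List.map_map, Lrec]
      rw [← ih k, ← ih (k+1)]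
      simp only [List.map_map]
      congr 1
      · apply List.map_congr_left; intro occ _
        simpa using maskOf_cons_zero occ
      · apply List.map_congr_left; intro occ _
        simpa using maskOf_shift occ

theorem tail_map_range (k : Nat) (g : Nat → List Nat) :
    (((List.range (k+1)).map g).tail) = (List.range k).map (fun j => g (j+1)) := by
  have hr : List.range (k+1) = 0 :: (List.range k).map (fun i => i+1) := by
    simpa [Nat.succ_eq_add_one] using List.range_succ_eq_map (n := k)
  rw [hr]
  simp [Function.comp]

theorem zip_aux (f : List Nat → List Nat → List Nat) : ∀ (k : Nat) (g : Nat → List Nat),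
    List.zipWith f ((List.range (k+1)).map g) ((List.range k).map (fun j => g (j+1)))
      = (List.range k).map (fun j => f (g j) (g (j+1))) := by
  intro k
  induction k with
  | zero => intro g; simp
  | succ k ih =>
    intro g
    have hr : ∀ m : Nat, List.range (m+1) = 0 :: (List.range m).map (fun i => i+1) := by
      intro m; simpa [Nat.succ_eq_add_one] using List.range_succ_eq_map (n := m)
    rw [hr (k+1), hr k]
    simp only [List.map_cons, List.map_map, List.zipWith_cons_cons]
    congr 1
    have h := ih (fun j => g (j+1))
    rw [hr k] at h
    simp only [List.map_cons, List.map_map] at h ⊢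
    exact h

theorem focksStep_rows (n k : Nat) :
    focksStep ((List.range (k+1)).map (Lrec n)) = (List.range (k+1)).map (Lrec (n+1)) := by
  unfold focksStep
  rw [tail_map_range, zip_aux]
  have hr : List.range (k+1) = 0 :: (List.range k).map (fun i => i+1) := by
    simpa [Nat.succ_eq_add_one] using List.range_succ_eq_map (n := k)
  conv_rhs => rw [hr]
  simp only [List.map_cons, List.map_map]
  congr 1

theorem init_rows (k : Nat) :
    [0] :: List.replicate k ([] : List Nat) = (List.range (k+1)).map (Lrec 0) := by
  have hr : List.range (k+1) = 0 :: (List.range k).map (fun i => i+1) := by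
    simpa [Nat.succ_eq_add_one] using List.range_succ_eq_map (n := k)
  rw [hr]
  simp only [List.map_cons, List.map_map]
  have h2 : (List.range k).map (Lrec 0 ∘ fun i => i+1) = List.replicate k ([] : List Nat) := by
    rw [List.map_congr_left (fun j _ =>
      show (Lrec 0 ∘ fun i => i+1) j = ([] : List Nat) by simp [Function.comp, Lrec])]
    simp [List.map_const']
  rw [h2]
  simp [Lrec]

theorem foldl_iterate (n : Nat) : ∀ (init : List (List Nat)),
    (List.range n).foldl (fun rows _ => focksStep rows) init = focksStep^[n] init := by
  induction n with
  | zero => intro init; simp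
  | succ n ih =>
    intro init
    rw [List.range_succ, List.foldl_append, ih, Function.iterate_succ_apply']
    rfl

theorem foldl_rows (k : Nat) (n : Nat) :
    (List.range n).foldl (fun rows _ => focksStep rows) ((List.range (k+1)).map (Lrec 0))
      = (List.range (k+1)).map (Lrec n) := by
  rw [foldl_iterate]
  induction n with
  | zero => simp
  | succ n ih => rw [Function.iterate_succ_apply', ih, focksStep_rows]

theorem pyCombos_eq_nil : ∀ (xs : List Nat) (k : Nat), xs.length < k → pyCombos xs k = [] := by
  intro xs
  induction xs with
  | nil => intro k hk; cases k with
    | zero => omega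
    | succ k => simp [pyCombos]
  | cons x xs ih =>
    intro k hk
    cases k with
    | zero => simp at hk
    | succ k =>
      simp only [pyCombos]
      rw [ih k (by simpa using hk), ih (k+1) (by simp at hk ⊢; omega)]
      simp

-- ===== VERDICT (by name: the statement is the Claim_ definition above) =====
theorem enumerate_fock_spec : Claim_equal_enumerate_fock := by
  intro Nsites Nparticles _ hpre
  unfold Pre_enumerate_fock at hpre
  unfold Spec_enumerate_fock enumerate_fock enumerate_fock_alt
  by_cases hbig : Nparticles > max Nsites 0
  · rw [if_pos (by omega), pyCombos_eq_nil _ _ (by simp; omega)]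
    rfl
  · rw [if_neg (by omega), init_rows Nparticles.toNat, foldl_rows,
        List.getD_eq_getElem _ _ (by simp)]
    simp only [List.getElem_map, List.getElem_range]
    have hn : (max Nsites 0).toNat = Nsites.toNat := by omega
    rw [hn, ← mask_pyCombos Nsites.toNat Nparticles.toNat, List.map_map]
    rfl
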